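-- pv_equiv track=rewrite | github.com/MaurycyOprus/Bioinf | genetyczny_my.py | lancuchy
-- ===== SOURCE A (Python) =====
-- def lancuchy(elements, length):
--     length = length - 1
--     range_of_count = len(elements) - 1
--     i = 0
--     while i < range_of_count:
--         matches_of_el, last_match = znajdz_lancuch(elements[i], elements, length)
--         while matches_of_el == 1:
--             el2 = elements[last_match]
--             elements[i] += el2[length:]
--             del elements[last_match]
--             range_of_count -= 1
--             if last_match < i:
--                 i -= 1
--             matches_of_el, last_match = znajdz_lancuch(elements[i], elements, length)
--         i += 1
--     return elements
--
-- def znajdz_lancuch(el1, elements, length):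
--     matches = 0
--     last_match_index = 0
--     for i in range(len(elements)):
--         el2 = elements[i]
--         if el1 != el2:
--             if el1[-length:] == el2[:length]:
--                 last_match_index = i
--                 matches += 1
--     return matches, last_match_index
-- ===== SOURCE B (Python) =====
-- # Zipper-based re-implementation: walks the list as (out, cur, right) and collects
-- # match positions with comprehensions instead of index arithmetic and in-place del.
-- # Equivalence is about the RETURN value only: A mutates its argument list, B does not.
-- def lancuchy(elements, length):
--     L = length - 1
--     if not elements:
--         return elements
--     out = []
--     cur, right = elements[0], elements[1:]
--     while right:
--         while True:
--             ml = [j for j, e in enumerate(out) if e != cur and cur[-L:] == e[:L]]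
--             mr = [j for j, e in enumerate(right) if e != cur and cur[-L:] == e[:L]]
--             if len(ml) + len(mr) != 1:
--                 break
--             if mr:
--                 j = mr[0]
--                 cur = cur + right[j][L:]
--                 right = right[:j] + right[j + 1:]
--             else:
--                 j = ml[0]
--                 cur = cur + out[j][L:]
--                 out = out[:j] + out[j + 1:]
--         out.append(cur)
--         if not right:
--             return out
--         cur, right = right[0], right[1:]
--     return out + [cur]
-- ===== Notes on version B (the rewrite author's own statement) =====
-- stated objective: alternative
-- what changed: Replaces A's in-place index arithmetic (global rescan helper returning a count and a last index, del by index, manual i adjustment after deletions) with a pure zipper (processed-prefix, current element, remaining-suffix) that collects match positions per side with comprehensions and rebuilds the list, never touching the input.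
import Mathlib
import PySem

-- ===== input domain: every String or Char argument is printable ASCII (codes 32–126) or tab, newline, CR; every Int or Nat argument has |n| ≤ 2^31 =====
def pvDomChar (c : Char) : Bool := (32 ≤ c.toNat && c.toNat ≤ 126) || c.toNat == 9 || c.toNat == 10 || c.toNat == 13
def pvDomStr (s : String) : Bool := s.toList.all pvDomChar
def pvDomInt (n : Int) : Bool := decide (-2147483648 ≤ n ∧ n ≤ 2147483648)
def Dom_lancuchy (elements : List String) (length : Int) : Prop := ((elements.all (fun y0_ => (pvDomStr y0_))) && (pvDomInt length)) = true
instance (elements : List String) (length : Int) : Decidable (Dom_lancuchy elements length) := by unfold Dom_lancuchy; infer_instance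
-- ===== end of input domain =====

-- B is an alternative implementation of the same greedy chain-merging: a pure zipper
-- (out, cur, right) with per-side match-position lists instead of A's in-place index
-- arithmetic; same cost. Equivalence is about the RETURN value only (A mutates its
-- argument list in place, B does not). The `fuel` arguments of both ports are totality
-- guards only (always sufficient on real runs; both sides use equal fuel).

-- ===== PORT A =====
-- znajdz_lancuch's `for i in range(len(elements))` as structural recursion carrying i
def znajdzAux (el1 : String) (len_ : Int) (xs : List String) (i : Nat) (m last : Nat) : Nat × Nat :=
  match xs with
  | [] => (m, last)
  | el2 :: rest =>
    if el1 ≠ el2 then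
      if PySem.Str.slice el1 (some (-len_)) none = PySem.Str.slice el2 none (some len_) then
        znajdzAux el1 len_ rest (i + 1) (m + 1) i
      else
        znajdzAux el1 len_ rest (i + 1) m last
    else
      znajdzAux el1 len_ rest (i + 1) m last

def znajdzLancuch (el1 : String) (elements : List String) (len_ : Int) : Nat × Nat :=
  znajdzAux el1 len_ elements 0 0 0

-- inner `while matches_of_el == 1` loop; returns (elements, i, range_of_count)
def lancuchyInner (fuel : Nat) (elements : List String) (i roc : Nat) (len_ : Int) :
    List String × Nat × Nat :=
  match fuel with
  | 0 => (elements, i, roc)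
  | f + 1 =>
    let p := znajdzLancuch (elements.getD i "") elements len_
    if p.1 = 1 then
      let last := p.2
      let el2 := elements.getD last ""
      let elements' := (elements.set i ((elements.getD i "") ++ PySem.Str.slice el2 (some len_) none)).eraseIdx last
      lancuchyInner f elements' (if last < i then i - 1 else i) (roc - 1) len_
    else
      (elements, i, roc)

-- outer `while i < range_of_count` loop
def lancuchyOuter (fuel : Nat) (elements : List String) (i roc : Nat) (len_ : Int) : List String :=
  match fuel with
  | 0 => elements
  | f + 1 =>
    if i < roc then
      let s := lancuchyInner (elements.length + 1) elements i roc len_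
      lancuchyOuter f s.1 (s.2.1 + 1) s.2.2 len_
    else
      elements

def lancuchy (elements : List String) (length : Int) : List String :=
  lancuchyOuter (2 * elements.length + 2) elements 0 (elements.length - 1) (length - 1)

-- ===== PORT B =====
-- the `[j for j, e in enumerate(xs) if e != cur and cur[-L:] == e[:L]]` comprehension
def matchIdxs (cur : String) (len_ : Int) (xs : List String) (j : Nat) : List Nat :=
  match xs with
  | [] => []
  | e :: rest =>
    if e ≠ cur ∧ PySem.Str.slice cur (some (-len_)) none = PySem.Str.slice e none (some len_) then
      j :: matchIdxs cur len_ rest (j + 1)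
    else
      matchIdxs cur len_ rest (j + 1)

-- Source B's inner `while True` merge loop on the zipper (out, cur, right)
def lancuchyAltInner (fuel : Nat) (out : List String) (cur : String) (right : List String)
    (len_ : Int) : List String × String × List String :=
  match fuel with
  | 0 => (out, cur, right)
  | f + 1 =>
    let ml := matchIdxs cur len_ out 0
    let mr := matchIdxs cur len_ right 0
    if ml.length + mr.length ≠ 1 then
      (out, cur, right)
    else
      match mr with
      | j :: _ =>
        lancuchyAltInner f out (cur ++ PySem.Str.slice (right.getD j "") (some len_) none)
          (right.eraseIdx j) len_
      | [] =>
        match ml with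
        | j :: _ =>
          lancuchyAltInner f (out.eraseIdx j)
            (cur ++ PySem.Str.slice (out.getD j "") (some len_) none) right len_
        | [] => (out, cur, right)  -- unreachable: the count is 1

-- Source B's outer `while right` loop
def lancuchyAltOuter (fuel : Nat) (out : List String) (cur : String) (right : List String)
    (len_ : Int) : List String :=
  match fuel with
  | 0 => out ++ cur :: right
  | f + 1 =>
    match right with
    | [] => out ++ [cur]
    | _ :: _ =>
      let s := lancuchyAltInner (out.length + 1 + right.length + 1) out cur right len_
      match s.2.2 with
      | [] => s.1 ++ [s.2.1]
      | r :: rs => lancuchyAltOuter f (s.1 ++ [s.2.1]) r rs len_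

def lancuchy_alt (elements : List String) (length : Int) : List String :=
  match elements with
  | [] => []
  | x :: xs => lancuchyAltOuter (2 * elements.length + 2) [] x xs (length - 1)

-- ===== PRECONDITION & SPEC =====
def Spec_lancuchy (elements : List String) (length : Int) (out : List String) : Prop := out = lancuchy_alt elements length
instance (elements : List String) (length : Int) (out : List String) : Decidable (Spec_lancuchy elements length out) := by unfold Spec_lancuchy; infer_instance

-- ===== CLAIM (what is proved, stated in full; the proofs are below) =====
def Claim_equal_lancuchy : Prop := ∀ (elements : List String) (length : Int), Dom_lancuchy elements length → Spec_lancuchy elements length (lancuchy elements length)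

-- ===== LEMMAS AND PROOFS =====

-- A's fold-style scan computes (count, last index) of B's match-position list
theorem znajdzAux_eq (el1 : String) (len_ : Int) (xs : List String) (j m last : Nat) :
    znajdzAux el1 len_ xs j m last =
      (m + (matchIdxs el1 len_ xs j).length, (matchIdxs el1 len_ xs j).getLast?.getD last) := by
  induction xs generalizing j m last with
  | nil => simp [znajdzAux, matchIdxs]
  | cons e rest ih =>
    by_cases h1 : el1 ≠ e <;>
      by_cases h2 : PySem.Str.slice el1 (some (-len_)) none = PySem.Str.slice e none (some len_) <;>
        simp [znajdzAux, matchIdxs, h1, h2, ne_comm, ih] <;>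
          cases hmr : matchIdxs el1 len_ rest (j + 1) <;>
            simp [List.getLast?_eq_some_getLast] <;> omega

-- matchIdxs facts
theorem matchIdxs_append (cur : String) (len_ : Int) (xs ys : List String) (j : Nat) :
    matchIdxs cur len_ (xs ++ ys) j = matchIdxs cur len_ xs j ++ matchIdxs cur len_ ys (j + xs.length) := by
  induction xs generalizing j with
  | nil => simp [matchIdxs]
  | cons e rest ih =>
    simp only [List.cons_append, matchIdxs, ih]
    split <;> simp <;> ring_nf

theorem matchIdxs_self_cons (cur : String) (len_ : Int) (ys : List String) (j : Nat) :
    matchIdxs cur len_ (cur :: ys) j = matchIdxs cur len_ ys (j + 1) := by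
  simp [matchIdxs]

theorem matchIdxs_shift (cur : String) (len_ : Int) (xs : List String) (j : Nat) :
    matchIdxs cur len_ xs j = (matchIdxs cur len_ xs 0).map (· + j) := by
  have key : ∀ (xs : List String) (a b : Nat),
      matchIdxs cur len_ xs (a + b) = (matchIdxs cur len_ xs a).map (· + b) := by
    intro xs
    induction xs with
    | nil => intro a b; simp [matchIdxs]
    | cons e rest ih =>
      intro a b
      simp only [matchIdxs]
      have h1 : a + b + 1 = (a + 1) + b := by omega
      split
      · simp [h1, ih (a + 1) b]
      · simpa [h1] using ih (a + 1) b
  simpa using key xs 0 j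

theorem matchIdxs_lt (cur : String) (len_ : Int) (xs : List String) (k : Nat)
    (h : k ∈ matchIdxs cur len_ xs 0) : k < xs.length := by
  have key : ∀ (xs : List String) (j k : Nat), k ∈ matchIdxs cur len_ xs j → k < j + xs.length := by
    intro xs
    induction xs with
    | nil => intro j k h; simp [matchIdxs] at h
    | cons e rest ih =>
      intro j k h
      simp only [matchIdxs] at h
      split at h
      · rcases List.mem_cons.mp h with rfl | h'
        · simp
        · have := ih (j+1) k h'; simp at this ⊢; omega
      · have := ih (j+1) k h; simp at this ⊢; omega
  simpa using key xs 0 k h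

-- inner-loop correspondence under the zipper invariant
theorem inner_corr (fuel : Nat) (out : List String) (cur : String) (right : List String) (len_ : Int) :
    lancuchyInner fuel (out ++ cur :: right) out.length (out.length + right.length) len_ =
      (let s := lancuchyAltInner fuel out cur right len_
       (s.1 ++ s.2.1 :: s.2.2, s.1.length, s.1.length + s.2.2.length)) := by
  induction fuel generalizing out cur right with
  | zero => simp [lancuchyInner, lancuchyAltInner]
  | succ f ih =>
    have hget : (out ++ cur :: right).getD out.length "" = cur := by
      simp [List.getD]
    have hz : znajdzLancuch cur (out ++ cur :: right) len_ =
        ((matchIdxs cur len_ out 0).length + (matchIdxs cur len_ right 0).length,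
         (matchIdxs cur len_ out 0 ++
           (matchIdxs cur len_ right 0).map (· + (out.length + 1))).getLast?.getD 0) := by
      rw [znajdzLancuch, znajdzAux_eq, matchIdxs_append, matchIdxs_self_cons,
        matchIdxs_shift cur len_ right (0 + out.length + 1)]
      simp
    by_cases hone : (matchIdxs cur len_ out 0).length + (matchIdxs cur len_ right 0).length = 1
    · cases hmr : matchIdxs cur len_ right 0 with
      | cons j t =>
        have hml : matchIdxs cur len_ out 0 = [] := by
          cases hx : matchIdxs cur len_ out 0 with
          | nil => rfl
          | cons a b => rw [hx, hmr] at hone; simp at hone; omega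
        have ht : t = [] := by
          rw [hmr, hml] at hone; simp at hone; omega
        subst ht
        have hj : j < right.length := matchIdxs_lt cur len_ right j (by rw [hmr]; simp)
        have herase : ∀ v : String, (out ++ v :: right).eraseIdx (j + (out.length + 1)) =
            out ++ v :: right.eraseIdx j := by
          intro v
          rw [List.eraseIdx_append_of_length_le (by omega)]
          congr 1
          rw [show j + (out.length + 1) - out.length = j + 1 from by omega]
          simp
        have hlen : (right.eraseIdx j).length = right.length - 1 := by
          simp [List.length_eraseIdx, hj]
        simp only [lancuchyInner, lancuchyAltInner]
        rw [hget, hz, hml, hmr]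
        have harith : out.length + right.length - 1 = out.length + (right.eraseIdx j).length := by
          rw [hlen]; omega
        have hel2' : (out ++ cur :: right)[j + (out.length + 1)]? = right[j]? := by
          rw [show j + (out.length + 1) = out.length + (j + 1) from by omega]
          simp [List.getElem?_append_right]
        simp [hel2', herase, show ¬ j + (out.length + 1) < out.length from by omega, harith, ih]
      | nil =>
        have hml : ∃ j, matchIdxs cur len_ out 0 = [j] := by
          rw [hmr] at hone
          cases hx : matchIdxs cur len_ out 0 with
          | nil => rw [hx] at hone; simp at hone
          | cons j t =>
            refine ⟨j, ?_⟩
            simp_all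
        obtain ⟨j, hml⟩ := hml
        have hj : j < out.length := matchIdxs_lt cur len_ out j (by rw [hml]; simp)
        have hel2' : (out ++ cur :: right)[j]? = out[j]? := List.getElem?_append_left hj
        have hset : ∀ v : String, (out ++ cur :: right).set out.length v = out ++ v :: right := by
          intro v; simp
        have herase : ∀ v : String, (out ++ v :: right).eraseIdx j = out.eraseIdx j ++ v :: right :=
          fun v => List.eraseIdx_append_of_lt_length hj _
        have hi : out.length - 1 = (out.eraseIdx j).length := by
          simp [List.length_eraseIdx, hj]
        have hr : out.length + right.length - 1 = (out.eraseIdx j).length + right.length := by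
          simp [List.length_eraseIdx, hj]; omega
        simp only [lancuchyInner, lancuchyAltInner]
        rw [hget, hz, hml, hmr]
        simp [hel2', hset, herase, hj, hi, hr, ih]
    · -- no unique match: both sides stop
      simp only [lancuchyInner, lancuchyAltInner]
      rw [hget, hz]
      simp [hone]

-- outer-loop correspondence
theorem outer_corr (fuel : Nat) (out : List String) (cur : String) (right : List String) (len_ : Int) :
    lancuchyOuter fuel (out ++ cur :: right) out.length (out.length + right.length) len_ =
      lancuchyAltOuter fuel out cur right len_ := by
  induction fuel generalizing out cur right with
  | zero => simp [lancuchyOuter, lancuchyAltOuter]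
  | succ f ih =>
    cases right with
    | nil => simp [lancuchyOuter, lancuchyAltOuter]
    | cons r rs =>
      have hfuel : (out ++ cur :: r :: rs).length + 1 = out.length + 1 + (r :: rs).length + 1 := by
        simp; omega
      simp only [lancuchyOuter, lancuchyAltOuter]
      rw [if_pos (by simp : out.length < out.length + (r :: rs).length), hfuel, inner_corr]
      cases hr' : (lancuchyAltInner (out.length + 1 + (r :: rs).length + 1) out cur (r :: rs) len_).2.2 with
      | nil =>
        simp only [hr']
        cases f <;> simp [lancuchyOuter]
      | cons x xs =>
        simp only [hr']
        have h2 := ih ((lancuchyAltInner (out.length + 1 + (r :: rs).length + 1) out cur (r :: rs) len_).1 ++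
          [(lancuchyAltInner (out.length + 1 + (r :: rs).length + 1) out cur (r :: rs) len_).2.1]) x xs
        simp only [List.length_append, List.length_cons, List.length_nil, List.append_assoc,
          List.cons_append, List.nil_append] at h2 ⊢
        rw [show ∀ n : Nat, n + (xs.length + 1) = n + 1 + xs.length from fun n => by omega]
        simp only [Nat.zero_add] at h2
        exact h2

-- ===== VERDICT (by name: the statement is the Claim_ definition above) =====
theorem lancuchy_spec : Claim_equal_lancuchy := by
  intro elements length _
  show lancuchy elements length = lancuchy_alt elements length
  cases elements with
  | nil => rfl
  | cons x xs =>
    have h := outer_corr (2 * (x :: xs).length + 2) [] x xs (length - 1)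
    simpa [lancuchy, lancuchy_alt] using h
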